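-- pv_equiv track=rewrite | github.com/shacharm2/worthless | src/worthless/cli/safe_rewrite.py | _shell_marker_scan
-- ===== SOURCE A (Python) =====
-- _SHELL_PREFIXES: tuple[str, ...] = (
--     "#!",
--     "alias ",
--     "function ",
--     "source ",
--     "if ",
--     "case ",
--     "eval ",
--     "eval\t",
-- )
--
-- _SHELL_INFIX_MARKERS: tuple[str, ...] = ("<<",)
--
-- def _shell_marker_scan(text: str) -> bool:
--     """Return True if *text* contains any shell-style construct."""
--     for raw_line in text.splitlines():
--         line = raw_line.lstrip()
--         if not line or line.startswith("#") and not line.startswith("#!"):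
--             continue
--         for prefix in _SHELL_PREFIXES:
--             if line.startswith(prefix):
--                 return True
--         for marker in _SHELL_INFIX_MARKERS:
--             if marker in line:
--                 return True
--     return False
-- ===== SOURCE B (Python) =====
-- _SHELL_KEYWORDS = frozenset({"alias", "function", "source", "if", "case", "eval"})
--
--
-- def _line_is_shell(raw_line: str) -> bool:
--     line = raw_line.lstrip()
--     if not line:
--         return False
--     if line.startswith("#"):
--         return line.startswith("#!")
--     if "<<" in line:
--         return True
--     head, sep, _ = line.partition(" ")
--     if sep and head in _SHELL_KEYWORDS:
--         return True
--     head, sep, _ = line.partition("\t")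
--     return bool(sep) and head == "eval"
--
--
-- def _shell_marker_scan(text: str) -> bool:
--     return any(_line_is_shell(raw_line) for raw_line in text.splitlines())
-- ===== Notes on version B (the rewrite author's own statement) =====
-- stated objective: alternative
-- what changed: Replaced the early-return loop over the prefix/marker tuples by a per-line predicate combined with any(): a shebang/comment case resolved directly, then partition() off the first word and a frozenset membership test instead of iterating eight startswith prefixes.
import Mathlib
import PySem

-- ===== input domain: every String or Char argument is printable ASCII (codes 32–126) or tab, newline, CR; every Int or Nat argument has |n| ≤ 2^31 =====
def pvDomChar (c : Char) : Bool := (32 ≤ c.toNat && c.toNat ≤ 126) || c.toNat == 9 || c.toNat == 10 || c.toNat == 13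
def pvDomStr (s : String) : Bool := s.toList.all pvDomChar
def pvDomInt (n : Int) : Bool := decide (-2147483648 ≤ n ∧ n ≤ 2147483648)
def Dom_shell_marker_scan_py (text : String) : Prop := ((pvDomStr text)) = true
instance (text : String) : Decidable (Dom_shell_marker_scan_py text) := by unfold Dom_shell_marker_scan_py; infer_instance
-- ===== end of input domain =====

-- B replaces A's two inner loops over prefix/marker tuples by a per-line predicate:
-- shebang/comment resolved directly, then the first word is split off (partition) and
-- tested for membership in a keyword set; same return value, different decomposition.

-- ===== PORT A =====
def pvShellPrefixes : List String :=
  ["#!", "alias ", "function ", "source ", "if ", "case ", "eval ", "eval\t"]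

def pvShellInfixMarkers : List String := ["<<"]

-- the outer for-loop with early returns, as structural recursion over the lines
def pvScanA : List String → Bool
  | [] => false
  | rawLine :: rest =>
    let line := PySem.Str.lstrip rawLine
    if PySem.Str.len line == 0 ||
        (PySem.Str.startswith line "#" && !PySem.Str.startswith line "#!") then
      pvScanA rest
    else if pvShellPrefixes.any (fun p => PySem.Str.startswith line p) then
      true
    else if pvShellInfixMarkers.any (fun m => PySem.Str.isIn m line) then
      true
    else
      pvScanA rest

def shell_marker_scan_py (text : String) : Bool :=
  pvScanA (PySem.Str.splitlines text)

-- ===== PORT B =====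
-- str.partition(sep) restricted to what B uses: (head before first sep, whether sep occurs)
def pvPartHead (sep : Char) : List Char → List Char × Bool
  | [] => ([], false)
  | c :: cs =>
    if c = sep then ([], true)
    else
      let r := pvPartHead sep cs
      (c :: r.1, r.2)

def pvShellKeywords : List (List Char) :=
  ["alias".toList, "function".toList, "source".toList, "if".toList, "case".toList, "eval".toList]

def pvLineIsShell (rawLine : String) : Bool :=
  let line := PySem.Str.lstrip rawLine
  if PySem.Str.len line == 0 then false
  else if PySem.Str.startswith line "#" then PySem.Str.startswith line "#!"
  else if PySem.Str.isIn "<<" line then true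
  else
    let p := pvPartHead ' ' line.toList
    if p.2 && pvShellKeywords.contains p.1 then true
    else
      let q := pvPartHead '\t' line.toList
      q.2 && q.1 == "eval".toList

def shell_marker_scan_py_alt (text : String) : Bool :=
  (PySem.Str.splitlines text).any pvLineIsShell

-- ===== PRECONDITION & SPEC =====
def Spec_shell_marker_scan_py (text : String) (out : Bool) : Prop := out = shell_marker_scan_py_alt text
instance (text : String) (out : Bool) : Decidable (Spec_shell_marker_scan_py text out) := by unfold Spec_shell_marker_scan_py; infer_instance

-- ===== CLAIM (what is proved, stated in full; the proofs are below) =====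
def Claim_equal_shell_marker_scan_py : Prop := ∀ (text : String), Dom_shell_marker_scan_py text → Spec_shell_marker_scan_py text (shell_marker_scan_py text)

-- ===== LEMMAS AND PROOFS =====

-- partition head characterisation: head = w and sep found  ↔  w ++ [sep] is a prefix
theorem pvPartHead_eq_iff (sep : Char) (w : List Char) (hw : sep ∉ w) :
    ∀ l : List Char, pvPartHead sep l = (w, true) ↔ w ++ [sep] <+: l := by
  induction w with
  | nil =>
    intro l
    cases l with
    | nil => simp [pvPartHead]
    | cons c cs =>
      by_cases h : c = sep
      · subst h; simp [pvPartHead]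
      · simp [pvPartHead, h, List.cons_prefix_cons, Ne.symm h]
  | cons a w' ih =>
    rw [List.mem_cons] at hw
    rw [not_or] at hw
    intro l
    cases l with
    | nil => simp [pvPartHead]
    | cons c cs =>
      by_cases h : c = sep
      · subst h
        simp [pvPartHead, List.cons_prefix_cons, Ne.symm hw.1]
      · rw [List.cons_append, List.cons_prefix_cons]
        simp only [pvPartHead, if_neg h, Prod.mk.injEq, List.cons.injEq]
        rw [← ih hw.2 cs, Prod.ext_iff]
        constructor
        · rintro ⟨⟨h1, h2⟩, h3⟩; exact ⟨h1.symm, h2, h3⟩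
        · rintro ⟨h1, h2, h3⟩; exact ⟨⟨h1.symm, h2⟩, h3⟩

-- A's word-prefix scan equals B's partition tests, as a propositional iff
theorem pvKey (l : List Char) :
    ("alias ".toList <+: l ∨ "function ".toList <+: l ∨ "source ".toList <+: l ∨
      "if ".toList <+: l ∨ "case ".toList <+: l ∨ "eval ".toList <+: l ∨ "eval\t".toList <+: l)
    ↔ (((pvPartHead ' ' l).2 = true ∧
          ((pvPartHead ' ' l).1 = "alias".toList ∨ (pvPartHead ' ' l).1 = "function".toList ∨
            (pvPartHead ' ' l).1 = "source".toList ∨ (pvPartHead ' ' l).1 = "if".toList ∨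
            (pvPartHead ' ' l).1 = "case".toList ∨ (pvPartHead ' ' l).1 = "eval".toList)) ∨
        ((pvPartHead '\t' l).2 = true ∧ (pvPartHead '\t' l).1 = "eval".toList)) := by
  constructor
  · rintro (h | h | h | h | h | h | h)
    · have := (pvPartHead_eq_iff ' ' "alias".toList (by decide) l).mpr (by simpa using h)
      exact Or.inl ⟨by rw [this], Or.inl (by rw [this])⟩
    · have := (pvPartHead_eq_iff ' ' "function".toList (by decide) l).mpr (by simpa using h)
      exact Or.inl ⟨by rw [this], Or.inr (Or.inl (by rw [this]))⟩
    · have := (pvPartHead_eq_iff ' ' "source".toList (by decide) l).mpr (by simpa using h)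
      exact Or.inl ⟨by rw [this], Or.inr (Or.inr (Or.inl (by rw [this])))⟩
    · have := (pvPartHead_eq_iff ' ' "if".toList (by decide) l).mpr (by simpa using h)
      exact Or.inl ⟨by rw [this], Or.inr (Or.inr (Or.inr (Or.inl (by rw [this]))))⟩
    · have := (pvPartHead_eq_iff ' ' "case".toList (by decide) l).mpr (by simpa using h)
      exact Or.inl ⟨by rw [this], Or.inr (Or.inr (Or.inr (Or.inr (Or.inl (by rw [this])))))⟩
    · have := (pvPartHead_eq_iff ' ' "eval".toList (by decide) l).mpr (by simpa using h)
      exact Or.inl ⟨by rw [this], Or.inr (Or.inr (Or.inr (Or.inr (Or.inr (by rw [this])))))⟩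
    · have := (pvPartHead_eq_iff '\t' "eval".toList (by decide) l).mpr (by simpa using h)
      exact Or.inr ⟨by rw [this], by rw [this]⟩
  · rintro (⟨h2, hk⟩ | ⟨h2, h1⟩)
    · have hmk : ∀ w : List Char, ' ' ∉ w → (pvPartHead ' ' l).1 = w →
          w ++ [' '] <+: l := by
        intro w hw h1
        exact (pvPartHead_eq_iff ' ' w hw l).mp (Prod.ext h1 h2)
      rcases hk with h1 | h1 | h1 | h1 | h1 | h1
      · exact Or.inl (by simpa using hmk _ (by decide) h1)
      · exact Or.inr (Or.inl (by simpa using hmk _ (by decide) h1))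
      · exact Or.inr (Or.inr (Or.inl (by simpa using hmk _ (by decide) h1)))
      · exact Or.inr (Or.inr (Or.inr (Or.inl (by simpa using hmk _ (by decide) h1))))
      · exact Or.inr (Or.inr (Or.inr (Or.inr (Or.inl (by simpa using hmk _ (by decide) h1)))))
      · exact Or.inr (Or.inr (Or.inr (Or.inr (Or.inr (Or.inl (by simpa using hmk _ (by decide) h1))))))
    · have := (pvPartHead_eq_iff '\t' "eval".toList (by decide) l).mp (Prod.ext h1 h2)
      exact Or.inr (Or.inr (Or.inr (Or.inr (Or.inr (Or.inr (by simpa using this))))))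

set_option maxHeartbeats 800000 in
theorem pvLine_eq (raw : String) (rest : List String) :
    pvScanA (raw :: rest) = (pvLineIsShell raw || pvScanA rest) := by
  rw [pvScanA, pvLineIsShell]
  simp only [PySem.Str.startswith_eq, PySem.Str.isIn_eq, PySem.Str.len_eq,
    PySem.Str.toList_lstrip, pvShellPrefixes, pvShellInfixMarkers, pvShellKeywords,
    List.any_cons, List.any_nil,
    show "#".toList = ['#'] from rfl, show "#!".toList = ['#', '!'] from rfl,
    show "<<".toList = ['<', '<'] from rfl,
    show "alias ".toList = ['a', 'l', 'i', 'a', 's', ' '] from rfl,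
    show "function ".toList = ['f', 'u', 'n', 'c', 't', 'i', 'o', 'n', ' '] from rfl,
    show "source ".toList = ['s', 'o', 'u', 'r', 'c', 'e', ' '] from rfl,
    show "if ".toList = ['i', 'f', ' '] from rfl,
    show "case ".toList = ['c', 'a', 's', 'e', ' '] from rfl,
    show "eval ".toList = ['e', 'v', 'a', 'l', ' '] from rfl,
    show "eval\t".toList = ['e', 'v', 'a', 'l', '\t'] from rfl,
    show "alias".toList = ['a', 'l', 'i', 'a', 's'] from rfl,
    show "function".toList = ['f', 'u', 'n', 'c', 't', 'i', 'o', 'n'] from rfl,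
    show "source".toList = ['s', 'o', 'u', 'r', 'c', 'e'] from rfl,
    show "if".toList = ['i', 'f'] from rfl,
    show "case".toList = ['c', 'a', 's', 'e'] from rfl,
    show "eval".toList = ['e', 'v', 'a', 'l'] from rfl]
  set L := PySem.Chars.lstrip raw.toList with hL
  by_cases he : L = []
  · simp [he]
  · have h0 : ((L.length : Int) == 0) = false := by simp [he]
    by_cases hH : PySem.Chars.startswith L ['#'] = true
    · by_cases hB : PySem.Chars.startswith L ['#', '!'] = true
      · -- shebang: A hits the "#!" prefix, B returns startswith "#!" = true
        simp [h0, hH, hB]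
      · -- plain comment: A skips the line, B contributes false
        simp [h0, hH, hB]
    · -- ordinary line: the shebang prefix is impossible, compare the word scans
      have hB : PySem.Chars.startswith L ['#', '!'] = false := by
        rw [Bool.eq_false_iff]
        intro hc
        apply hH
        rw [PySem.Chars.startswith_iff] at hc ⊢
        exact List.IsPrefix.trans (by decide) hc
      simp only [Bool.not_eq_true] at hH
      by_cases hM : PySem.Chars.isIn ['<', '<'] L = true
      · simp [h0, hH, hM, hB]
      · simp only [Bool.not_eq_true] at hM
        rw [if_neg (by simp [h0, hH]), h0, hH]
        simp only [if_neg (by decide : ¬ false = true), hB, hM, Bool.false_or,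
          Bool.or_false]
        cases hr : pvScanA rest
        · simp only [Bool.or_false]
          rw [Bool.eq_iff_iff]
          have k := pvKey L
          simp only [show "alias ".toList = ['a', 'l', 'i', 'a', 's', ' '] from rfl,
            show "function ".toList = ['f', 'u', 'n', 'c', 't', 'i', 'o', 'n', ' '] from rfl,
            show "source ".toList = ['s', 'o', 'u', 'r', 'c', 'e', ' '] from rfl,
            show "if ".toList = ['i', 'f', ' '] from rfl,
            show "case ".toList = ['c', 'a', 's', 'e', ' '] from rfl,
            show "eval ".toList = ['e', 'v', 'a', 'l', ' '] from rfl,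
            show "eval\t".toList = ['e', 'v', 'a', 'l', '\t'] from rfl,
            show "alias".toList = ['a', 'l', 'i', 'a', 's'] from rfl,
            show "function".toList = ['f', 'u', 'n', 'c', 't', 'i', 'o', 'n'] from rfl,
            show "source".toList = ['s', 'o', 'u', 'r', 'c', 'e'] from rfl,
            show "if".toList = ['i', 'f'] from rfl,
            show "case".toList = ['c', 'a', 's', 'e'] from rfl,
            show "eval".toList = ['e', 'v', 'a', 'l'] from rfl] at k
          simpa [List.contains_eq_mem, PySem.Chars.startswith_iff] using k
        · simp

theorem pvScanA_eq_any (ls : List String) : pvScanA ls = ls.any pvLineIsShell := by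
  induction ls with
  | nil => rfl
  | cons raw rest ih => rw [pvLine_eq, ih, List.any_cons]

-- ===== VERDICT (by name: the statement is the Claim_ definition above) =====
theorem shell_marker_scan_py_spec : Claim_equal_shell_marker_scan_py := by
  intro text _
  unfold Spec_shell_marker_scan_py shell_marker_scan_py shell_marker_scan_py_alt
  exact pvScanA_eq_any _
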